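-- pv_equiv track=rewrite | github.com/Barbo1/python-calculator | ModCalcular.py | polyTerms
-- ===== SOURCE A (Python) =====
-- def polyTerms(polyin):
--
--     #--initialize variables--
--     parente = 0
--     ret1 = []
--     terms = []
--
--     #--if is between parenthesis--
--     for x in range(0, len(polyin)):
--         if polyin[x] == "(":
--             parente += 1
--         elif polyin[x] == ")":
--             parente -= 1
--         if (polyin[x] == "-" or polyin[x] == "+") and parente == 0:
--             if x != 0:
--                 ret1.append(x)
--
--     ret1.append(len(polyin))
--
--     #--separate terms--
--     for y in range(len(ret1)):
--         if y == 0: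
--             terms.append(str(polyin[0:ret1[y]]))
--         elif y > 0:
--             terms.append(str(polyin[ret1[y-1]:ret1[y]]))
--     return terms
-- ===== SOURCE B (Python) =====
-- def polyTerms(polyin):
--     terms = []
--     buf = ""
--     depth = 0
--     for i, c in enumerate(polyin):
--         if c == "(":
--             depth += 1
--         elif c == ")":
--             depth -= 1
--         if c in "+-" and depth == 0 and i != 0:
--             terms.append(buf)
--             buf = c
--         else:
--             buf += c
--     terms.append(buf)
--     return terms
-- ===== Notes on version B (the rewrite author's own statement) =====
-- stated objective: simpler
-- what changed: A makes two passes (collect top-level sign indices into a list, append len, then re-scan slicing between consecutive indices); B is one pass with a running parenthesis depth and a current-term buffer, emitting each term directly.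
import Mathlib
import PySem

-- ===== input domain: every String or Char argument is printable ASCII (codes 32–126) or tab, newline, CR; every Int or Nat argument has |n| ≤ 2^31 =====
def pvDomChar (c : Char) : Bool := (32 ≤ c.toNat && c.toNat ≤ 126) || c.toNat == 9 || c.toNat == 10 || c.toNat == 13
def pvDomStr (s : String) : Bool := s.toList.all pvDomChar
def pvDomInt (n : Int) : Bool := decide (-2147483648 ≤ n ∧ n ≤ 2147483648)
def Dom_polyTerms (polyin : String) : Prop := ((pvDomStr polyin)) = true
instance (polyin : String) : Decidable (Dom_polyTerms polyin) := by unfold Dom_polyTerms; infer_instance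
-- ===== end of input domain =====

-- B replaces A's two passes (collect split indices, then slice) by one pass with a
-- running parenthesis depth and a current-term buffer; objective: simpler.

-- ===== PORT A =====
-- literal transliteration of A: first loop collects top-level '+'/'-' indices into ret1
-- (polyin[x] ported via pyGetD, always in range for x in range(0, len)), then appends len,
-- then the second loop slices polyin between consecutive indices.
def polyTerms (polyin : String) : List String :=
  let cs := polyin.toList
  let n : Int := cs.length
  let st := (PySem.List.pyRange 0 n 1).foldl
    (fun (st : Int × List Int) x =>
      let c := PySem.List.pyGetD cs x ' '
      let parente := if c = '(' then st.1 + 1 else if c = ')' then st.1 - 1 else st.1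
      if (c = '-' ∨ c = '+') ∧ parente = 0 then
        (if x ≠ 0 then (parente, st.2 ++ [x]) else (parente, st.2))
      else (parente, st.2))
    (0, [])
  let ret1 := st.2 ++ [n]
  (PySem.List.pyRange 0 (ret1.length : Int) 1).foldl
    (fun terms y =>
      if y = 0 then
        terms ++ [String.ofList (PySem.List.slice cs (some 0) (some (PySem.List.pyGetD ret1 y 0)))]
      else
        terms ++ [String.ofList (PySem.List.slice cs (some (PySem.List.pyGetD ret1 (y - 1) 0)) (some (PySem.List.pyGetD ret1 y 0)))])
    []

-- ===== PORT B =====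
-- literal transliteration of Source B: one pass with (terms, buf, depth) over enumerate(polyin).
def polyTerms_alt (polyin : String) : List String :=
  let st := (PySem.List.enumerate polyin.toList 0).foldl
    (fun (st : List String × String × Int) ic =>
      let d := if ic.2 = '(' then st.2.2 + 1 else if ic.2 = ')' then st.2.2 - 1 else st.2.2
      if (ic.2 = '+' ∨ ic.2 = '-') ∧ d = 0 ∧ ic.1 ≠ 0 then
        (st.1 ++ [st.2.1], String.ofList [ic.2], d)
      else (st.1, st.2.1.push ic.2, d))
    ([], "", 0)
  st.1 ++ [st.2.1]

-- ===== PRECONDITION & SPEC =====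
def Spec_polyTerms (polyin : String) (out : List String) : Prop := out = polyTerms_alt polyin
instance (polyin : String) (out : List String) : Decidable (Spec_polyTerms polyin out) := by unfold Spec_polyTerms; infer_instance

-- ===== CLAIM (what is proved, stated in full; the proofs are below) =====
def Claim_equal_polyTerms : Prop := ∀ (polyin : String), Dom_polyTerms polyin → Spec_polyTerms polyin (polyTerms polyin)

-- ===== LEMMAS AND PROOFS =====

-- depth update for one character
def updD (d : Int) (c : Char) : Int := if c = '(' then d + 1 else if c = ')' then d - 1 else d

-- the split indices A's first loop collects, as Nats, scanning suffix `suf` from absolute index x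
def cutsA : List Char → Int → Nat → List Nat
  | [], _, _ => []
  | c :: rest, d, x =>
    let d' := updD d c
    (if (c = '-' ∨ c = '+') ∧ d' = 0 ∧ x ≠ 0 then [x] else []) ++ cutsA rest d' (x + 1)

-- slices of cs between consecutive indices, starting at p
def sliceBN (cs : List Char) : Nat → List Nat → List (List Char)
  | _, [] => []
  | p, q :: qs => (cs.drop p).take (q - p) :: sliceBN cs q qs

def consHead (c : Char) : List (List Char) → List (List Char)
  | [] => []
  | b :: bs => (c :: b) :: bs

def prep (l : List Char) : List (List Char) → List (List Char)
  | [] => []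
  | b :: bs => (l ++ b) :: bs

-- the common one-pass splitting specification
def split1 : List Char → Int → Bool → List (List Char)
  | [], _, _ => [[]]
  | c :: rest, d, f =>
    let d' := updD d c
    if (c = '-' ∨ c = '+') ∧ d' = 0 ∧ f = true then [] :: consHead c (split1 rest d' true)
    else consHead c (split1 rest d' true)

-- the step functions of the three folds, definitionally equal to the ports' inline lambdas
def gA (cs : List Char) : (Int × List Int) → Int → (Int × List Int) := fun st x =>
  let c := PySem.List.pyGetD cs x ' '
  let parente := if c = '(' then st.1 + 1 else if c = ')' then st.1 - 1 else st.1
  if (c = '-' ∨ c = '+') ∧ parente = 0 then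
    (if x ≠ 0 then (parente, st.2 ++ [x]) else (parente, st.2))
  else (parente, st.2)

def gT (cs : List Char) (q : List Int) : List String → Int → List String := fun terms y =>
  if y = 0 then
    terms ++ [String.ofList (PySem.List.slice cs (some 0) (some (PySem.List.pyGetD q y 0)))]
  else
    terms ++ [String.ofList (PySem.List.slice cs (some (PySem.List.pyGetD q (y - 1) 0)) (some (PySem.List.pyGetD q y 0)))]

def gB : (List String × String × Int) → (Int × Char) → (List String × String × Int) := fun st ic =>
  let dd := if ic.2 = '(' then st.2.2 + 1 else if ic.2 = ')' then st.2.2 - 1 else st.2.2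
  if (ic.2 = '+' ∨ ic.2 = '-') ∧ dd = 0 ∧ ic.1 ≠ 0 then
    (st.1 ++ [st.2.1], String.ofList [ic.2], dd)
  else (st.1, st.2.1.push ic.2, dd)

lemma prep_nil : ∀ L, prep [] L = L := by
  intro L; cases L <;> simp [prep]

lemma prep_consHead (l : List Char) (c : Char) (L : List (List Char)) :
    prep l (consHead c L) = prep (l ++ [c]) L := by
  cases L <;> simp [prep, consHead]

lemma consHead_eq_prep (c : Char) (L : List (List Char)) : consHead c L = prep [c] L := by
  cases L <;> simp [consHead, prep]

lemma cutsA_ge : ∀ (suf : List Char) (d : Int) (x : Nat) (q : Nat), q ∈ cutsA suf d x → x ≤ q := by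
  intro suf
  induction suf with
  | nil => intro d x q h; simp [cutsA] at h
  | cons c rest ih =>
    intro d x q h
    simp only [cutsA, List.mem_append] at h
    rcases h with h | h
    · split at h <;> simp at h; omega
    · have := ih _ _ _ h; omega

lemma sliceBN_shift (cs : List Char) (x : Nat) (c : Char) (rest : List Char)
    (hx : cs.drop x = c :: rest) (q : Nat) (hq : x < q) (qs : List Nat) :
    sliceBN cs x (q :: qs) = consHead c (sliceBN cs (x + 1) (q :: qs)) := by
  have hdrop : cs.drop (x + 1) = rest := by
    have : cs.drop (x + 1) = (cs.drop x).drop 1 := by rw [List.drop_drop]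
    rw [this, hx]; rfl
  simp only [sliceBN, consHead, hx, hdrop]
  congr 1
  have : q - x = (q - (x + 1)) + 1 := by omega
  rw [this, List.take_succ_cons]

-- the crux: the slices between A's cut indices are exactly the one-pass split
lemma main_split : ∀ (suf : List Char) (cs : List Char) (x : Nat) (d : Int),
    cs.drop x = suf →
    sliceBN cs x (cutsA suf d x ++ [cs.length]) = split1 suf d (decide (x ≠ 0)) := by
  intro suf
  induction suf with
  | nil =>
    intro cs x d h
    have hx : cs.length ≤ x := by
      by_contra hc
      have := List.drop_eq_nil_iff.mp h
      omega
    simp [cutsA, sliceBN, split1, h]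
  | cons c rest ih =>
    intro cs x d h
    have hxlt : x < cs.length := by
      by_contra hc
      rw [List.drop_eq_nil_iff.mpr (by omega)] at h
      simp at h
    have hdrop : cs.drop (x + 1) = rest := by
      have : cs.drop (x + 1) = (cs.drop x).drop 1 := by rw [List.drop_drop]
      rw [this, h]; rfl
    have hhead : ∀ q ∈ cutsA rest (updD d c) (x + 1) ++ [cs.length], x < q := by
      intro q hq
      rcases List.mem_append.mp hq with h1 | h1
      · have := cutsA_ge _ _ _ _ h1; omega
      · simp at h1; omega
    have htail : sliceBN cs x (cutsA rest (updD d c) (x + 1) ++ [cs.length])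
        = consHead c (split1 rest (updD d c) true) := by
      rcases hL : cutsA rest (updD d c) (x + 1) ++ [cs.length] with _ | ⟨q, qs⟩
      · exact absurd hL (by simp)
      · rw [← hL, hL, sliceBN_shift cs x c rest h q (hhead q (by rw [hL]; simp)) qs, ← hL]
        rw [ih cs (x + 1) (updD d c) hdrop]
        simp
    by_cases hc : (c = '-' ∨ c = '+') ∧ updD d c = 0 ∧ x ≠ 0
    · simp only [cutsA, split1]
      rw [if_pos hc, if_pos (by exact ⟨hc.1, hc.2.1, by simp [hc.2.2]⟩)]
      simp only [List.cons_append, sliceBN, Nat.sub_self, List.take_zero, List.nil_append]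
      rw [htail]
    · simp only [cutsA, split1]
      rw [if_neg hc, if_neg (by simpa using hc)]
      simpa using htail

-- one application of gB, in spec vocabulary
lemma gB_apply (terms : List String) (buf : String) (d : Int) (x : Int) (c : Char) :
    gB (terms, buf, d) (x, c)
    = if (c = '+' ∨ c = '-') ∧ updD d c = 0 ∧ x ≠ 0 then
        (terms ++ [buf], String.ofList [c], updD d c)
      else (terms, buf.push c, updD d c) := rfl

-- B's one-pass fold computes split1
lemma foldB_eq (suf : List Char) : ∀ (x : Nat) (terms : List String) (buf : String) (d : Int),
    ((PySem.List.enumerate suf (x : Int)).foldl gB (terms, buf, d)).1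
      ++ [((PySem.List.enumerate suf (x : Int)).foldl gB (terms, buf, d)).2.1]
    = terms ++ (prep buf.toList (split1 suf d (decide (x ≠ 0)))).map String.ofList := by
  induction suf with
  | nil =>
    intro x terms buf d
    simp [PySem.List.enumerate, split1, prep]
  | cons c rest ih =>
    intro x terms buf d
    have henum : PySem.List.enumerate (c :: rest) (x : Int)
        = ((x : Int), c) :: PySem.List.enumerate rest (((x + 1 : Nat) : Int)) := by
      simp [PySem.List.enumerate]
    rw [henum]
    simp only [List.foldl_cons, gB_apply]
    by_cases hc : (c = '+' ∨ c = '-') ∧ updD d c = 0 ∧ (x : Int) ≠ 0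
    · have hx : x ≠ 0 := by intro h0; exact hc.2.2 (by simp [h0])
      rw [if_pos hc, ih (x + 1) (terms ++ [buf]) (String.ofList [c]) (updD d c)]
      simp only [split1]
      rw [if_pos (show (c = '-' ∨ c = '+') ∧ updD d c = 0 ∧ decide (x ≠ 0) = true from
        ⟨hc.1.symm, hc.2.1, by simp [hx]⟩)]
      simp [prep, consHead_eq_prep]
    · rw [if_neg hc, ih (x + 1) terms (buf.push c) (updD d c)]
      simp only [split1]
      rw [if_neg (show ¬ ((c = '-' ∨ c = '+') ∧ updD d c = 0 ∧ decide (x ≠ 0) = true) from by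
        intro hcond
        exact hc ⟨hcond.1.symm, hcond.2.1, by
          have hx : x ≠ 0 := by simpa using hcond.2.2
          exact_mod_cast Nat.cast_ne_zero.mpr hx⟩)]
      rw [prep_consHead]
      simp [String.toList_push]

-- A's first loop collects exactly cutsA
lemma foldA1 (cs : List Char) : ∀ (suf : List Char) (x : Nat) (d : Int) (acc : List Int),
    cs.drop x = suf →
    (PySem.List.pyRange (x : Int) (cs.length : Int) 1).foldl (gA cs) (d, acc)
    = (List.foldl updD d suf, acc ++ (cutsA suf d x).map (Nat.cast : Nat → Int)) := by
  intro suf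
  induction suf with
  | nil =>
    intro x d acc h
    have hx : cs.length ≤ x := by
      by_contra hc
      have := List.drop_eq_nil_iff.mp h
      omega
    rw [PySem.List.pyRange_one_eq_nil (by exact_mod_cast hx)]
    simp [cutsA]
  | cons c rest ih =>
    intro x d acc h
    have hxlt : x < cs.length := by
      by_contra hc
      rw [List.drop_eq_nil_iff.mpr (by omega)] at h
      simp at h
    have hdrop : cs.drop (x + 1) = rest := by
      have : cs.drop (x + 1) = (cs.drop x).drop 1 := by rw [List.drop_drop]
      rw [this, h]; rfl
    have hget : PySem.List.pyGetD cs (x : Int) ' ' = c := by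
      rw [PySem.List.pyGetD_natCast, List.getD_eq_getElem?_getD, ← List.head?_drop, h]
      rfl
    rw [PySem.List.pyRange_one_cons (by exact_mod_cast hxlt)]
    simp only [List.foldl_cons]
    have happ : gA cs (d, acc) (x : Int)
        = (updD d c,
           acc ++ (if (c = '-' ∨ c = '+') ∧ updD d c = 0 ∧ x ≠ 0 then [((x : Nat) : Int)] else [])) := by
      have hu : (if c = '(' then d + 1 else if c = ')' then d - 1 else d) = updD d c := rfl
      simp only [gA, hget, hu]
      by_cases h1 : (c = '-' ∨ c = '+') ∧ updD d c = 0
      · rw [if_pos h1]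
        by_cases h2 : x ≠ 0
        · rw [if_pos (by exact_mod_cast Nat.cast_ne_zero.mpr h2), if_pos ⟨h1.1, h1.2, h2⟩]
        · rw [if_neg (by simpa using h2), if_neg (fun hcond => h2 hcond.2.2)]
          simp
      · rw [if_neg h1, if_neg (fun hcond => h1 ⟨hcond.1, hcond.2.1⟩)]
        simp
    rw [happ, show ((x : Int) + 1) = (((x + 1 : Nat) : Int)) from by push_cast; ring,
      ih (x + 1) (updD d c) _ hdrop]
    simp only [cutsA]
    split_ifs <;> simp

-- A's second loop slices between consecutive collected indices
lemma foldA2 (cs : List Char) : ∀ (rest : List Nat) (front : List Int) (terms : List String)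
    (h : front ≠ []) (p : Nat), front.getLast h = (p : Int) →
    (PySem.List.pyRange (front.length : Int) (((front ++ rest.map (Nat.cast : Nat → Int)).length : Nat) : Int) 1).foldl
      (gT cs (front ++ rest.map (Nat.cast : Nat → Int))) terms
    = terms ++ (sliceBN cs p rest).map String.ofList := by
  intro rest
  induction rest with
  | nil =>
    intro front terms h p hp
    rw [PySem.List.pyRange_one_eq_nil (by simp)]
    simp [sliceBN]
  | cons q qs ih =>
    intro front terms h p hp
    have hflen : 0 < front.length := List.length_pos_of_ne_nil h
    have hlt : (front.length : Int) < (((front ++ (q :: qs).map (Nat.cast : Nat → Int)).length : Nat) : Int) := by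
      simp
    rw [PySem.List.pyRange_one_cons hlt]
    simp only [List.foldl_cons]
    have hgetPrev : PySem.List.pyGetD (front ++ (q :: qs).map (Nat.cast : Nat → Int)) ((front.length : Int) - 1) 0
        = (p : Int) := by
      rw [show ((front.length : Int) - 1) = ((front.length - 1 : Nat) : Int) from by omega,
        PySem.List.pyGetD_natCast,
        List.getD_eq_getElem (_) (0 : Int) (by simp; omega),
        List.getElem_append_left (by omega)]
      rw [← hp]
      exact (List.getLast_eq_getElem h).symm
    have hgetCur : PySem.List.pyGetD (front ++ (q :: qs).map (Nat.cast : Nat → Int)) ((front.length : Int)) 0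
        = (q : Int) := by
      rw [PySem.List.pyGetD_natCast,
        List.getD_eq_getElem (_) (0 : Int) (by simp),
        List.getElem_append_right (by omega)]
      simp
    have happ : gT cs (front ++ (q :: qs).map (Nat.cast : Nat → Int)) terms (front.length : Int)
        = terms ++ [String.ofList ((cs.drop p).take (q - p))] := by
      simp only [gT]
      rw [if_neg (by exact_mod_cast Nat.cast_ne_zero.mpr (by omega)), hgetPrev, hgetCur,
        PySem.List.slice_natCast]
    rw [happ]
    have hlist : front ++ (q :: qs).map (Nat.cast : Nat → Int)
        = (front ++ [(q : Int)]) ++ qs.map (Nat.cast : Nat → Int) := by simp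
    have hlen : ((front.length : Int) + 1) = (((front ++ [(q : Int)]).length : Nat) : Int) := by
      simp
    rw [hlist, hlen, ih (front ++ [(q : Int)]) _ (by simp) q (List.getLast_concat)]
    simp [sliceBN]

-- characterizations of the two ports
lemma portB_eq (polyin : String) :
    polyTerms_alt polyin = (split1 polyin.toList 0 false).map String.ofList := by
  have h := foldB_eq polyin.toList 0 [] "" 0
  simp only [Nat.cast_zero] at h
  rw [show (decide ((0 : Nat) ≠ 0)) = false from by simp] at h
  rw [show ("" : String).toList = [] from rfl, prep_nil] at h
  simpa using h

lemma portA_eq (polyin : String) :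
    polyTerms polyin = (sliceBN polyin.toList 0 (cutsA polyin.toList 0 0 ++ [polyin.toList.length])).map String.ofList := by
  have hA : polyTerms polyin
      = (PySem.List.pyRange 0
          (((((PySem.List.pyRange 0 (polyin.toList.length : Int) 1).foldl (gA polyin.toList) (0, [])).2
              ++ [(polyin.toList.length : Int)]).length : Nat) : Int) 1).foldl
          (gT polyin.toList
            (((PySem.List.pyRange 0 (polyin.toList.length : Int) 1).foldl (gA polyin.toList) (0, [])).2
              ++ [(polyin.toList.length : Int)])) [] := rfl
  rw [hA]
  have h1 := foldA1 polyin.toList polyin.toList 0 0 [] (by simp)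
  simp only [Nat.cast_zero, List.nil_append] at h1
  rw [h1]
  obtain ⟨q0, qs, hK⟩ := List.exists_cons_of_ne_nil
    (show cutsA polyin.toList 0 0 ++ [polyin.toList.length] ≠ [] by simp)
  rw [hK]
  have hmap : (cutsA polyin.toList 0 0).map (Nat.cast : Nat → Int) ++ [(polyin.toList.length : Int)]
      = ((q0 : Int)) :: qs.map (Nat.cast : Nat → Int) := by
    have : (cutsA polyin.toList 0 0).map (Nat.cast : Nat → Int) ++ [(polyin.toList.length : Int)]
        = ((cutsA polyin.toList 0 0 ++ [polyin.toList.length]).map (Nat.cast : Nat → Int)) := by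
      simp
    rw [this, hK]
    simp
  rw [hmap]
  have hlen0 : (0 : Int) < ((((q0 : Int)) :: qs.map (Nat.cast : Nat → Int)).length : Int) := by
    simp
  rw [PySem.List.pyRange_one_cons hlen0]
  simp only [List.foldl_cons]
  have hs : PySem.List.slice polyin.toList (some 0) (some ((q0 : Nat) : Int))
      = (polyin.toList.drop 0).take (q0 - 0) := by
    have := PySem.List.slice_natCast polyin.toList 0 q0
    simp only [Nat.cast_zero] at this
    rw [this]
  have happ0 : gT polyin.toList (((q0 : Int)) :: qs.map (Nat.cast : Nat → Int)) [] 0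
      = [String.ofList ((polyin.toList.drop 0).take (q0 - 0))] := by
    simp only [gT, if_pos, PySem.List.pyGetD_zero_cons]
    rw [hs]
    simp
  rw [happ0]
  have h2 := foldA2 polyin.toList qs [((q0 : Int))]
    [String.ofList ((polyin.toList.drop 0).take (q0 - 0))] (by simp) q0 (by simp)
  simp only [List.singleton_append, List.length_cons, List.length_nil] at h2
  norm_num at h2 ⊢
  rw [h2]
  simp [sliceBN]

theorem polyTerms_spec : Claim_equal_polyTerms := by
  intro polyin _
  unfold Spec_polyTerms
  rw [portA_eq, portB_eq,
    main_split polyin.toList polyin.toList 0 0 (by simp)]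
  simp
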